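-- pv_equiv track=rewrite | github.com/LucasMagnum/coding-challenges | python/daily_interview_pro/202007/05.py | solution
-- ===== SOURCE A (Python) =====
-- def solution(nums, low, high):
--     ranges = []
--
--     if not nums:
--         ranges.append((low, high))
--         return ranges
--
--     if low < nums[0]:
--         ranges.append((low, nums[0] - 1))
--
--     for idx in range(len(nums) - 1):
--         if nums[idx + 1] - nums[idx] > 1:
--             ranges.append((nums[idx] + 1, nums[idx + 1] - 1))
--
--     if nums[-1] < high:
--         ranges.append((nums[-1] + 1, high))
--
--     return ranges
-- ===== SOURCE B (Python) =====
-- def solution(nums, low, high):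
--     if not nums:
--         return [(low, high)]
--     out = []
--     cur = low  # first value not yet covered
--     for n in nums:
--         if cur < n:
--             out.append((cur, n - 1))
--         cur = n + 1
--     if cur <= high:
--         out.append((cur, high))
--     return out
-- ===== Notes on version B (the rewrite author's own statement) =====
-- stated objective: alternative
-- what changed: A's three staged phases (low-boundary guard, index loop comparing nums[idx+1]-nums[idx], high-boundary guard) are replaced by a cursor sweep: one loop over the elements carries cur, the first value not yet covered, emits (cur, n-1) whenever cur < n and sets cur = n+1, with a single final (cur, high) check; only the empty-list case stays special.
import Mathlib
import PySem

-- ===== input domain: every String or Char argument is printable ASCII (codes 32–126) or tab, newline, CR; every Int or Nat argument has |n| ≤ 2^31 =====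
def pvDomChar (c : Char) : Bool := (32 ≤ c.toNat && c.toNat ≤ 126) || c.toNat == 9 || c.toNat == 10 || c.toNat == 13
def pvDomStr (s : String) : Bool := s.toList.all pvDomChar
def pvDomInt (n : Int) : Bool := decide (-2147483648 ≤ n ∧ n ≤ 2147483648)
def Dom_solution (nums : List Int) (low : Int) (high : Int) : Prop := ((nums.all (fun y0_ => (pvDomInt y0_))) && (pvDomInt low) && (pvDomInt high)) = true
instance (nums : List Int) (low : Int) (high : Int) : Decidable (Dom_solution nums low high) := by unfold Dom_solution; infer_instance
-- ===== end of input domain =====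

-- B replaces A's three staged phases (low guard, index loop over adjacent elements, high guard)
-- by one cursor sweep carrying the first value not yet covered; objective: alternative.

-- ===== PORT A =====
def solution (nums : List Int) (low : Int) (high : Int) : List (Int × Int) :=
  let ranges : List (Int × Int) := []
  if nums.isEmpty then ranges ++ [(low, high)]
  else
    let ranges := if low < PySem.List.pyGetD nums 0 0 then ranges ++ [(low, PySem.List.pyGetD nums 0 0 - 1)] else ranges
    let ranges := (PySem.List.pyRange 0 ((nums.length : Int) - 1) 1).foldl
      (fun acc idx =>
        if PySem.List.pyGetD nums (idx + 1) 0 - PySem.List.pyGetD nums idx 0 > 1 then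
          acc ++ [(PySem.List.pyGetD nums idx 0 + 1, PySem.List.pyGetD nums (idx + 1) 0 - 1)]
        else acc) ranges
    if PySem.List.pyGetD nums (-1) 0 < high then ranges ++ [(PySem.List.pyGetD nums (-1) 0 + 1, high)] else ranges

-- ===== PORT B =====
def solution_alt (nums : List Int) (low : Int) (high : Int) : List (Int × Int) :=
  if nums = [] then [(low, high)]
  else
    let st := nums.foldl
      (fun (st : List (Int × Int) × Int) n =>
        ((if st.2 < n then st.1 ++ [(st.2, n - 1)] else st.1), n + 1)) ([], low)
    if st.2 ≤ high then st.1 ++ [(st.2, high)] else st.1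

-- ===== PRECONDITION & SPEC =====
def Spec_solution (nums : List Int) (low : Int) (high : Int) (out : List (Int × Int)) : Prop := out = solution_alt nums low high
instance (nums : List Int) (low : Int) (high : Int) (out : List (Int × Int)) : Decidable (Spec_solution nums low high out) := by unfold Spec_solution; infer_instance

-- ===== CLAIM (what is proved, stated in full; the proofs are below) =====
def Claim_equal_solution : Prop := ∀ (nums : List Int) (low : Int) (high : Int), Dom_solution nums low high → Spec_solution nums low high (solution nums low high)

-- ===== LEMMAS AND PROOFS =====

-- proof-side recursive description of B's cursor sweep
def pvGo (high : Int) (cur : Int) : List Int → List (Int × Int)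
  | [] => if cur ≤ high then [(cur, high)] else []
  | n :: rest => (if cur < n then [(cur, n - 1)] else []) ++ pvGo high (n + 1) rest

-- B's foldl with the final high check equals the recursive sweep
theorem pv_foldl_go (high : Int) (l : List Int) :
    ∀ (acc : List (Int × Int)) (cur : Int),
      (if (l.foldl (fun (st : List (Int × Int) × Int) n =>
            ((if st.2 < n then st.1 ++ [(st.2, n - 1)] else st.1), n + 1)) (acc, cur)).2 ≤ high then
        (l.foldl (fun (st : List (Int × Int) × Int) n =>
            ((if st.2 < n then st.1 ++ [(st.2, n - 1)] else st.1), n + 1)) (acc, cur)).1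
          ++ [((l.foldl (fun (st : List (Int × Int) × Int) n =>
            ((if st.2 < n then st.1 ++ [(st.2, n - 1)] else st.1), n + 1)) (acc, cur)).2, high)]
      else
        (l.foldl (fun (st : List (Int × Int) × Int) n =>
            ((if st.2 < n then st.1 ++ [(st.2, n - 1)] else st.1), n + 1)) (acc, cur)).1)
      = acc ++ pvGo high cur l := by
  induction l with
  | nil => intro acc cur; simp only [List.foldl_nil, pvGo]; split_ifs <;> simp
  | cons n t ih =>
    intro acc cur
    simp only [List.foldl_cons, pvGo]
    rw [ih]
    split_ifs <;> simp

-- the middle gaps, as emitted by A's index loop, over the consecutive pairs of l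
def pvGaps (l : List Int) : List (Int × Int) :=
  ((l.zip l.tail).filter (fun p => decide (p.2 - p.1 > 1))).map (fun p => (p.1 + 1, p.2 - 1))

-- the index loop of A reads exactly the consecutive pairs of nums
theorem pv_map_pairs (l : List Int) :
    (PySem.List.pyRange 0 ((l.length : Int) - 1) 1).map
      (fun i => (PySem.List.pyGetD l i 0, PySem.List.pyGetD l (i + 1) 0)) = l.zip l.tail := by
  apply List.ext_getElem
  · simp [PySem.List.length_pyRange_one]
  · intro k h1 h2
    simp only [List.getElem_map, PySem.List.getElem_pyRange_one, zero_add]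
    have hk : k < l.length - 1 := by
      simpa [PySem.List.length_pyRange_one] using h1
    have h1' : (PySem.List.pyGetD l (k : Int) 0) = l[k] := by
      rw [PySem.List.pyGetD_natCast]
      exact List.getD_eq_getElem l 0 (by omega)
    have h2' : (PySem.List.pyGetD l ((k : Int) + 1) 0) = l[k + 1] := by
      rw [show ((k : Int) + 1) = ((k + 1 : Nat) : Int) by push_cast; ring,
        PySem.List.pyGetD_natCast]
      exact List.getD_eq_getElem l 0 (by omega)
    simp [h1', h2', List.getElem_zip, List.getElem_tail]

-- A's index loop, rewritten as the filter/map pvGaps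
theorem pv_fold_key (l : List Int) (acc : List (Int × Int)) :
    (PySem.List.pyRange 0 ((l.length : Int) - 1) 1).foldl
      (fun acc idx =>
        if PySem.List.pyGetD l (idx + 1) 0 - PySem.List.pyGetD l idx 0 > 1 then
          acc ++ [(PySem.List.pyGetD l idx 0 + 1, PySem.List.pyGetD l (idx + 1) 0 - 1)]
        else acc) acc
    = acc ++ pvGaps l := by
  have e1 := (List.foldl_map
    (f := fun i => (PySem.List.pyGetD l i 0, PySem.List.pyGetD l (i + 1) 0))
    (g := fun acc (p : Int × Int) => if p.2 - p.1 > 1 then acc ++ [(p.1 + 1, p.2 - 1)] else acc)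
    (l := PySem.List.pyRange 0 ((l.length : Int) - 1) 1) (init := acc)).symm
  rw [show (PySem.List.pyRange 0 ((l.length : Int) - 1) 1).foldl
      (fun acc idx =>
        if PySem.List.pyGetD l (idx + 1) 0 - PySem.List.pyGetD l idx 0 > 1 then
          acc ++ [(PySem.List.pyGetD l idx 0 + 1, PySem.List.pyGetD l (idx + 1) 0 - 1)]
        else acc) acc
    = ((PySem.List.pyRange 0 ((l.length : Int) - 1) 1).map
        (fun i => (PySem.List.pyGetD l i 0, PySem.List.pyGetD l (i + 1) 0))).foldl
        (fun acc (p : Int × Int) => if p.2 - p.1 > 1 then acc ++ [(p.1 + 1, p.2 - 1)] else acc) acc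
    from e1, pv_map_pairs]
  simpa [pvGaps] using PySem.List.foldl_append_if
    (fun p : Int × Int => decide (p.2 - p.1 > 1)) (fun p => (p.1 + 1, p.2 - 1))
    (l.zip l.tail) acc

-- the last element of x :: xs, as getElem
theorem pv_getElem_last (xs : List Int) : ∀ x : Int, (x :: xs)[xs.length]'(by simp) = xs.getLastD x := by
  induction xs with
  | nil => intro x; simp
  | cons y ys ih => intro x; rw [List.getLastD_cons]; simpa using ih y

-- nums[-1] is getLastD
theorem pv_pyGetD_neg_one (x : Int) (xs : List Int) :
    PySem.List.pyGetD (x :: xs) (-1) 0 = xs.getLastD x := by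
  have hl : 1 ≤ (x :: xs).length := by simp
  simp only [PySem.List.pyGetD, PySem.List.pyGet?, PySem.List.pyIdx?, Int.reduceNeg, Int.neg_nonneg,
    Int.reduceLE, ↓reduceIte, neg_le_neg_iff, Nat.one_le_cast, neg_neg, Int.toNat_one]
  rw [if_pos hl, Option.bind_some, List.getElem?_eq_getElem (by simp)]
  simpa using pv_getElem_last xs x

theorem pv_pyGetD_zero (x : Int) (xs : List Int) :
    PySem.List.pyGetD (x :: xs) 0 0 = x := by
  simp [PySem.List.pyGetD, PySem.List.pyGet?, PySem.List.pyIdx?]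

-- B's recursive sweep on a nonempty list equals A's three-phase shape
theorem pv_pvGo_eq (high : Int) (xs : List Int) :
    ∀ (x cur : Int), pvGo high cur (x :: xs)
      = (if cur < x then [(cur, x - 1)] else []) ++ pvGaps (x :: xs)
        ++ (if xs.getLastD x < high then [(xs.getLastD x + 1, high)] else []) := by
  induction xs with
  | nil =>
    intro x cur
    simp only [pvGo, pvGaps]
    have : (x + 1 ≤ high) = (x < high) := by
      simp only [eq_iff_iff]; omega
    simp [this]
  | cons y ys ih =>
    intro x cur
    have step : pvGo high cur (x :: y :: ys)
        = (if cur < x then [(cur, x - 1)] else []) ++ pvGo high (x + 1) (y :: ys) := rfl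
    rw [step, ih y (x + 1)]
    have hgaps : pvGaps (x :: y :: ys)
        = (if x + 1 < y then [(x + 1, y - 1)] else []) ++ pvGaps (y :: ys) := by
      simp only [pvGaps, List.tail_cons, List.zip_cons_cons, List.filter_cons]
      by_cases h : y - x > 1
      · rw [if_pos (by simpa using h), if_pos (by omega)]; simp
      · rw [if_neg (by simpa using h), if_neg (by omega)]; simp
    rw [hgaps]
    have hlast : (y :: ys).getLast?.getD x = ys.getLast?.getD y := by
      cases h : ys.getLast? <;> simp [List.getLast?_cons, h]
    simp [hlast, List.append_assoc]

-- ===== VERDICT (by name: the statement is the Claim_ definition above) =====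
theorem solution_spec : Claim_equal_solution := by
  intro nums low high _
  unfold Spec_solution solution solution_alt
  cases nums with
  | nil => simp
  | cons x xs =>
    have hne : (x :: xs : List Int) ≠ [] := by simp
    simp only [List.isEmpty_cons, Bool.false_eq_true, if_neg, not_false_eq_true, hne]
    rw [pv_fold_key, pv_pyGetD_zero, pv_pyGetD_neg_one, pv_foldl_go high (x :: xs) [] low,
      pv_pvGo_eq high xs x low]
    split_ifs <;> simp
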